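-- pv_equiv track=rewrite | github.com/Bamlaku667/codeforce-contests | A_Do_Not_Be_Distracted.py | is_teacher_suspicious
-- ===== SOURCE A (Python) =====
-- def is_teacher_suspicious(n, tasks):
--     last_task = ""
--     dict = {}
--
--     for task in tasks:
--         if task != last_task:
--             if task in dict:
--                 return "NO"
--             last_task = task
--         if task in dict:
--             dict[task] += 1
--         else:
--             dict[task] = 0
--
--
--     return "YES"
-- ===== SOURCE B (Python) =====
-- def is_teacher_suspicious(n, tasks):
--     groups = []
--     for task in tasks:
--         if not groups or groups[-1] != task:
--             groups.append(task)
--     return "NO" if len(set(groups)) != len(groups) else "YES"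
-- ===== Notes on version B (the rewrite author's own statement) =====
-- stated objective: simpler
-- what changed: Replaces the stateful dict-with-sentinel scan and inline early return by a single run-length-compression pass followed by one set-based uniqueness check on the compressed blocks.
import Mathlib
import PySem

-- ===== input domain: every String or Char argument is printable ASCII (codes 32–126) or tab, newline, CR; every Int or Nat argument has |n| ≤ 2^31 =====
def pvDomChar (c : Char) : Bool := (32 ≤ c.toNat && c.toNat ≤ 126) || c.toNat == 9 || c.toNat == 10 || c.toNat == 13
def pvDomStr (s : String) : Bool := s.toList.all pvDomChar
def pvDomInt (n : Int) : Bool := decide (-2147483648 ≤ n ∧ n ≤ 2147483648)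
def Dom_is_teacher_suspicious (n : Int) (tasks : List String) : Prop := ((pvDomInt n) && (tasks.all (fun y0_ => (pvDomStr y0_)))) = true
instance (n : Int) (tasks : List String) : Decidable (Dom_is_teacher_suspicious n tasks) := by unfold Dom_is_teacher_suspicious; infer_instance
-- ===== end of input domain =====

-- B replaces A's dict-with-sentinel early-return scan by run-length compression plus one set uniqueness check (objective: simpler).

-- ===== PORT A =====
-- the dict-update body of A's loop: dict[task] += 1 / dict[task] = 0
def pvAStep (d : PySem.Dict String Int) (t : String) : PySem.Dict String Int :=
  if d.contains t then d.modify t 0 (· + 1) else d.insert t 0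

-- A's for-loop with early return, state (last_task, dict)
def pvALoop : List String → String → PySem.Dict String Int → String
  | [], _, _ => "YES"
  | t :: rest, last, d =>
    if t ≠ last then
      if d.contains t then "NO"
      else pvALoop rest t (pvAStep d t)
    else pvALoop rest last (pvAStep d t)

def is_teacher_suspicious (n : Int) (tasks : List String) : String :=
  pvALoop tasks "" PySem.Dict.empty

-- ===== PORT B =====
-- one compression step: append task unless it equals the last block
def pvBStep (g : List String) (t : String) : List String :=
  if g = [] ∨ g.getLast? ≠ some t then g ++ [t] else g

def is_teacher_suspicious_alt (n : Int) (tasks : List String) : String :=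
  let groups := tasks.foldl pvBStep []
  if (PySem.Set.ofList groups).length ≠ groups.length then "NO" else "YES"

-- ===== PRECONDITION & SPEC =====
def Spec_is_teacher_suspicious (n : Int) (tasks : List String) (out : String) : Prop := out = is_teacher_suspicious_alt n tasks
instance (n : Int) (tasks : List String) (out : String) : Decidable (Spec_is_teacher_suspicious n tasks out) := by unfold Spec_is_teacher_suspicious; infer_instance

-- ===== CLAIM (what is proved, stated in full; the proofs are below) =====
def Claim_equal_is_teacher_suspicious : Prop := ∀ (n : Int) (tasks : List String), Dom_is_teacher_suspicious n tasks → Spec_is_teacher_suspicious n tasks (is_teacher_suspicious n tasks)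

-- ===== LEMMAS AND PROOFS =====

-- folding Set.add over l extends s by a sublist of l
lemma foldl_add_sublist (l : List String) : ∀ s : List String,
    ∃ l', l'.Sublist l ∧ l.foldl PySem.Set.add s = s ++ l' := by
  induction l with
  | nil => intro s; exact ⟨[], List.Sublist.refl _, by simp⟩
  | cons x xs ih =>
    intro s
    obtain ⟨l', hsub, heq⟩ := ih (PySem.Set.add s x)
    simp only [List.foldl_cons]
    by_cases hx : x ∈ s
    · refine ⟨l', hsub.cons x, ?_⟩
      rw [heq]; simp [PySem.Set.add, PySem.Set.contains, hx]
    · refine ⟨x :: l', hsub.cons₂ x, ?_⟩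
      rw [heq]; simp [PySem.Set.add, PySem.Set.contains, hx]

-- len(set(l)) == len(l) iff l has no duplicates
lemma ofList_length_eq_iff (l : List String) :
    (PySem.Set.ofList l).length = l.length ↔ l.Nodup := by
  obtain ⟨l', hsub, heq⟩ := foldl_add_sublist l []
  have hof : PySem.Set.ofList l = l' := by
    rw [PySem.Set.ofList_eq_foldl, heq]; simp
  constructor
  · intro hlen
    have : l' = l := hsub.eq_of_length (by rw [← hof]; exact hlen)
    have hnd := PySem.Set.nodup_ofList (xs := l)
    rwa [hof, this] at hnd
  · intro hnd
    have hmem : ∀ x ∈ l, x ∈ l' := by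
      intro x hx
      rw [← hof]; exact (PySem.Set.mem_ofList l x).mpr hx
    have hge : l.length ≤ l'.length := by
      have h1 : l.toFinset ⊆ l'.toFinset := by
        intro x hx; simp only [List.mem_toFinset] at *; exact hmem x hx
      calc l.length = l.toFinset.card := (List.toFinset_card_of_nodup hnd).symm
        _ ≤ l'.toFinset.card := Finset.card_le_card h1
        _ ≤ l'.length := l'.toFinset_card_le
    rw [hof, hsub.eq_of_length (Nat.le_antisymm hsub.length_le hge)]

-- B's fold only appends: the start list is a prefix of the result
lemma foldl_bstep_prefix (ts : List String) : ∀ g : List String,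
    g.IsPrefix (ts.foldl pvBStep g) := by
  induction ts with
  | nil => intro g; simp
  | cons t ts ih =>
    intro g
    simp only [List.foldl_cons]
    refine List.IsPrefix.trans ?_ (ih (pvBStep g t))
    unfold pvBStep
    split
    · exact ⟨[t], rfl⟩
    · exact List.prefix_refl _

lemma foldl_bstep_not_nodup {g : List String} (ts : List String) (h : ¬ g.Nodup) :
    ¬ (ts.foldl pvBStep g).Nodup := fun hn =>
  h (hn.sublist (foldl_bstep_prefix ts g).sublist)

-- membership in the updated dict
lemma contains_pvAStep (d : PySem.Dict String Int) (t s : String) :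
    (pvAStep d t).contains s = (d.contains s || s == t) := by
  unfold pvAStep
  split
  · rw [PySem.Dict.contains_modify, Bool.or_comm]
  · rw [PySem.Dict.contains_insert, Bool.or_comm]

-- main invariant: A's loop from (last, d) equals B's verdict on the fold from g,
-- provided last is g's last block, g is duplicate-free and d's keys are g's elements
lemma loop_invariant (ts : List String) : ∀ (g : List String) (last : String)
    (d : PySem.Dict String Int),
    g.getLast? = some last → g.Nodup → (∀ s, d.contains s = true ↔ s ∈ g) →
    pvALoop ts last d =
      (if (PySem.Set.ofList (ts.foldl pvBStep g)).length ≠ (ts.foldl pvBStep g).length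
       then "NO" else "YES") := by
  induction ts with
  | nil =>
    intro g last d hlast hnd _
    simp only [List.foldl_nil, pvALoop]
    rw [if_neg (by simp [(ofList_length_eq_iff g).mpr hnd])]
  | cons t ts ih =>
    intro g last d hlast hnd hkeys
    have hgne : g ≠ [] := by intro h; rw [h] at hlast; simp at hlast
    simp only [List.foldl_cons]
    by_cases hteq : t = last
    · -- same block: A updates the dict, B leaves groups unchanged
      subst hteq
      have hbs : pvBStep g t = g := by
        unfold pvBStep; rw [if_neg]; simp [hgne, hlast]
      simp only [hbs]
      have hA : pvALoop (t :: ts) t d = pvALoop ts t (pvAStep d t) := by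
        simp only [pvALoop]; rw [if_neg (by simp)]
      rw [hA]
      have htg : t ∈ g := by
        obtain ⟨h, rfl⟩ := List.mem_getLast?_eq_getLast
          (show t ∈ g.getLast? by rw [hlast]; rfl)
        exact List.getLast_mem h
      refine ih g t (pvAStep d t) hlast hnd ?_
      intro s
      rw [contains_pvAStep]
      by_cases hst : s = t
      · subst hst; simp [htg]
      · simpa [hst] using hkeys s
    · -- new block starts
      have hbs : pvBStep g t = g ++ [t] := by
        unfold pvBStep; rw [if_pos]; right; simp [hlast]; exact fun h => hteq h.symm
      simp only [hbs]
      by_cases hmem : t ∈ g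
      · -- duplicate block: A returns NO; B's compressed list has a duplicate
        have hA : pvALoop (t :: ts) last d = "NO" := by
          simp only [pvALoop]
          rw [if_pos hteq, if_pos ((hkeys t).mpr hmem)]
        rw [hA]
        have hdup : ¬ (g ++ [t]).Nodup := by
          intro hnod
          rw [List.nodup_append] at hnod
          exact hnod.2.2 t hmem t (by simp) rfl
        rw [if_pos (by
          intro hlen
          exact foldl_bstep_not_nodup ts hdup ((ofList_length_eq_iff _).mp hlen))]
      · have hc : d.contains t = false := by
          rw [Bool.eq_false_iff]; intro h; exact hmem ((hkeys t).mp h)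
        have hA : pvALoop (t :: ts) last d = pvALoop ts t (pvAStep d t) := by
          simp only [pvALoop]
          rw [if_pos hteq, if_neg (by simp [hc])]
        rw [hA]
        refine ih (g ++ [t]) t (pvAStep d t) (by simp) ?_ ?_
        · rw [List.nodup_append]
          exact ⟨hnd, List.nodup_singleton t,
            fun a ha b hb heq => by
              rw [List.mem_singleton] at hb
              exact hmem (hb ▸ heq ▸ ha)⟩
        · intro s
          rw [contains_pvAStep]
          by_cases hst : s = t
          · subst hst; simp
          · simpa [hst] using hkeys s

-- ===== VERDICT (by name: the statement is the Claim_ definition above) =====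
theorem is_teacher_suspicious_spec : Claim_equal_is_teacher_suspicious := by
  intro n tasks _
  show is_teacher_suspicious n tasks = is_teacher_suspicious_alt n tasks
  unfold is_teacher_suspicious is_teacher_suspicious_alt
  cases tasks with
  | nil => decide
  | cons t rest =>
    simp only [List.foldl_cons]
    have hbs : pvBStep [] t = [t] := by unfold pvBStep; simp
    simp only [hbs]
    have hstep : pvAStep PySem.Dict.empty t = PySem.Dict.empty.insert t 0 := by
      unfold pvAStep; rw [if_neg (by simp [PySem.Dict.contains_empty])]
    have hinv := loop_invariant rest [t] t (pvAStep PySem.Dict.empty t)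
      (by simp) (by simp)
      (by intro s; rw [hstep, PySem.Dict.contains_insert]
          simp [PySem.Dict.contains_empty])
    by_cases hte : t = ""
    · subst hte
      have hA : pvALoop ("" :: rest) "" PySem.Dict.empty
          = pvALoop rest "" (pvAStep PySem.Dict.empty "") := by
        simp only [pvALoop]; rw [if_neg (by simp)]
      rw [hA]; exact hinv
    · have hA : pvALoop (t :: rest) "" PySem.Dict.empty
          = pvALoop rest t (pvAStep PySem.Dict.empty t) := by
        simp only [pvALoop]
        rw [if_pos hte, if_neg (by simp [PySem.Dict.contains_empty])]
      rw [hA]; exact hinv
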